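-- pv_equiv track=rewrite | github.com/fransholwerda/AdventOfCode | 2017/Day13/star_one.py | run_through_firewall
-- ===== SOURCE A (Python) =====
-- def run_next_picosecond(firewall):
-- 	for layer in firewall:
-- 		if (len(layer) > 0):
-- 			if layer[0] == 0:
-- 				layer[1] = 1
-- 			elif layer[0] == layer[2] - 1:
-- 				layer[1] = -1
-- 			layer[0] += layer[1]
-- 	return firewall
--
-- def run_through_firewall(firewall):
-- 	packet_pos = 0
-- 	layers_cought = []
-- 	while packet_pos < len(firewall):
-- 		if len(firewall[packet_pos]) > 0:
-- 			if firewall[packet_pos][0] == 0: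
-- 				layers_cought.append(packet_pos)
-- 		firewall = run_next_picosecond(firewall)
-- 		packet_pos += 1
-- 	return layers_cought
-- ===== SOURCE B (Python) =====
-- def run_through_firewall(firewall):
--     # Per-layer simulation: each layer's scanner evolves independently, so
--     # simulate layer i alone for i picoseconds instead of stepping the whole
--     # firewall every tick. (A mutates its argument in place; B does not --
--     # the equivalence claimed is about the return value.)
--     caught = []
--     for depth, layer in enumerate(firewall):
--         if not layer:
--             continue
--         p = layer[0]
--         if depth:
--             v, r = layer[1], layer[2]
--             for _ in range(depth):
--                 if p == 0:
--                     v = 1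
--                 elif p == r - 1:
--                     v = -1
--                 p += v
--         if p == 0:
--             caught.append(depth)
--     return caught
-- ===== Notes on version B (the rewrite author's own statement) =====
-- stated objective: alternative
-- what changed: Instead of time-stepping the whole mutable firewall one picosecond per layer (A), B treats each layer independently and simulates only that layer's scanner for its own depth, without mutating the input.
import Mathlib
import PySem

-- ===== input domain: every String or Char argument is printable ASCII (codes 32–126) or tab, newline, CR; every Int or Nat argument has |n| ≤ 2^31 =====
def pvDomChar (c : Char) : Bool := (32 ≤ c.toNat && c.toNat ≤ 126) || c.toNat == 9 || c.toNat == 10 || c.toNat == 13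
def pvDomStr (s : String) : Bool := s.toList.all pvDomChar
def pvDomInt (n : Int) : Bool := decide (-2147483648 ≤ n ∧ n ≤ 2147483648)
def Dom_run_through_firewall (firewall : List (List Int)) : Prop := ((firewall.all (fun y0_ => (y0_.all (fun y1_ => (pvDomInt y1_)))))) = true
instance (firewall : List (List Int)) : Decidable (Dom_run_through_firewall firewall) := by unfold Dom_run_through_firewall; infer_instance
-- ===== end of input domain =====

-- B simulates each layer's scanner independently for its own depth instead of
-- time-stepping the whole firewall every picosecond (alternative decomposition;
-- A mutates its argument in place, B does not — equivalence is about the return value).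

-- ===== PORT A =====
-- A's inner for-loop body on a single layer; List.getD is exact here because
-- Pre_ only admits layers whose indices 0..2 are in range (Python raises otherwise).
def pvStepLayer (layer : List Int) : List Int :=
  if 0 < layer.length then
    let layer :=
      if layer.getD 0 0 = 0 then layer.set 1 1
      else if layer.getD 0 0 = layer.getD 2 0 - 1 then layer.set 1 (-1)
      else layer
    layer.set 0 (layer.getD 0 0 + layer.getD 1 0)
  else layer

def run_next_picosecond (firewall : List (List Int)) : List (List Int) :=
  firewall.map pvStepLayer

-- the while-loop of A, recursing on the remaining distance
def pvRunA (firewall : List (List Int)) (packet_pos : Nat) (acc : List Int) : List Int :=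
  if h : packet_pos < firewall.length then
    let layer := firewall[packet_pos]
    let acc :=
      if 0 < layer.length then
        if layer.getD 0 0 = 0 then acc ++ [(packet_pos : Int)] else acc
      else acc
    pvRunA (run_next_picosecond firewall) (packet_pos + 1) acc
  else acc
termination_by firewall.length - packet_pos
decreasing_by simp [run_next_picosecond]; omega

def run_through_firewall (firewall : List (List Int)) : List Int :=
  pvRunA firewall 0 []

-- ===== PORT B =====
-- B's inner for-loop: advance one scanner k picoseconds
def pvSim : Nat → Int → Int → Int → Int
  | 0, p, _, _ => p
  | k + 1, p, v, r =>
    let v' := if p = 0 then 1 else if p = r - 1 then -1 else v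
    pvSim k (p + v') v' r

-- B's main for-loop over (depth, layer)
def pvGoB (depth : Nat) : List (List Int) → List Int
  | [] => []
  | layer :: rest =>
    let tail := pvGoB (depth + 1) rest
    if layer.length = 0 then tail
    else
      let p := if depth = 0 then layer.getD 0 0
               else pvSim depth (layer.getD 0 0) (layer.getD 1 0) (layer.getD 2 0)
      if p = 0 then (depth : Int) :: tail else tail

def run_through_firewall_alt (firewall : List (List Int)) : List Int :=
  pvGoB 0 firewall

-- ===== PRECONDITION & SPEC =====
-- Pre_ excludes exactly the inputs on which A raises IndexError: any layer of
-- length 1 or 2 is read/written at index 1 or 2 at some picosecond, except the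
-- single returning corner of a length-2 layer starting at 0 in a 1-layer firewall.
def Pre_run_through_firewall (firewall : List (List Int)) : Prop :=
  ∀ l ∈ firewall, l = [] ∨ 3 ≤ l.length ∨
    (l.length = 2 ∧ l.getD 0 0 = 0 ∧ firewall.length = 1)

instance (firewall : List (List Int)) : Decidable (Pre_run_through_firewall firewall) := by
  unfold Pre_run_through_firewall; infer_instance

def pvWitness_run_through_firewall : List (List Int) := [[0, 1, 4], [1, 1, 3], [], [2, -1, 3]]

def Spec_run_through_firewall (firewall : List (List Int)) (out : List Int) : Prop := out = run_through_firewall_alt firewall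
instance (firewall : List (List Int)) (out : List Int) : Decidable (Spec_run_through_firewall firewall out) := by unfold Spec_run_through_firewall; infer_instance

-- ===== CLAIM (what is proved, stated in full; the proofs are below) =====
def Claim_equal_run_through_firewall : Prop := ∀ (firewall : List (List Int)), Dom_run_through_firewall firewall → Pre_run_through_firewall firewall → Spec_run_through_firewall firewall (run_through_firewall firewall)

-- ===== LEMMAS AND PROOFS =====

-- layers that are empty or have all three fields; preserved by stepping
def pvInv (fw : List (List Int)) : Prop := ∀ l ∈ fw, l = [] ∨ 3 ≤ l.length

-- the new direction a step of A assigns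
def pvV (a b c : Int) : Int := if a = 0 then 1 else if a = c - 1 then -1 else b

lemma step_cons3 (a b c : Int) (rest : List Int) :
    pvStepLayer (a :: b :: c :: rest) = (a + pvV a b c) :: pvV a b c :: c :: rest := by
  simp only [pvStepLayer, pvV]
  split_ifs <;> simp_all [List.set]

lemma sim_step (k : Nat) (a b c : Int) :
    pvSim (k + 1) a b c = pvSim k (a + pvV a b c) (pvV a b c) c := rfl

-- proof-side view of B's loop with the label (base) and the number of
-- simulation steps (rel) split apart
def pvGoSim (base rel : Nat) : List (List Int) → List Int
  | [] => []
  | l :: rest =>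
    let tail := pvGoSim base (rel + 1) rest
    if l.length = 0 then tail
    else if pvSim rel (l.getD 0 0) (l.getD 1 0) (l.getD 2 0) = 0
      then ((base + rel : Nat) : Int) :: tail else tail

lemma sim_zero (p v r : Int) : pvSim 0 p v r = p := rfl

lemma goB_eq_goSim (ls : List (List Int)) : ∀ d, pvGoB d ls = pvGoSim 0 d ls := by
  induction ls with
  | nil => intro d; rfl
  | cons l rest ih =>
    intro d
    simp only [pvGoB, pvGoSim, ih (d + 1), Nat.zero_add]
    by_cases h0 : d = 0
    · subst h0; simp [sim_zero]
    · simp [h0]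

lemma goSim_step (ls : List (List Int)) :
    ∀ base rel, (∀ l ∈ ls, l = [] ∨ 3 ≤ l.length) →
      pvGoSim (base + 1) rel (ls.map pvStepLayer) = pvGoSim base (rel + 1) ls := by
  induction ls with
  | nil => intro _ _ _; rfl
  | cons l rest ih =>
    intro base rel hinv
    have hl := hinv l (by simp)
    have hrest : ∀ l ∈ rest, l = [] ∨ 3 ≤ l.length := fun x hx => hinv x (by simp [hx])
    rcases hl with rfl | hlen
    · simp only [List.map_cons, pvGoSim, ih _ _ hrest]
      rfl
    · obtain ⟨a, b, c, tl, rfl⟩ : ∃ a b c tl, l = a :: b :: c :: tl := by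
        match l, hlen with
        | a :: b :: c :: tl, _ => exact ⟨a, b, c, tl, rfl⟩
      simp only [List.map_cons, pvGoSim, ih _ _ hrest, step_cons3]
      simp only [sim_step, List.length_cons, List.getD]
      have h : ((base : Int)) + 1 + rel = base + (rel + 1) := by ring
      simp [h]

lemma inv_step (fw : List (List Int)) (h : pvInv fw) : pvInv (run_next_picosecond fw) := by
  intro l hl
  simp only [run_next_picosecond, List.mem_map] at hl
  obtain ⟨x, hx, rfl⟩ := hl
  rcases h x hx with rfl | hlen
  · left; rfl
  · right
    obtain ⟨a, b, c, tl, rfl⟩ : ∃ a b c tl, x = a :: b :: c :: tl := by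
      match x, hlen with
      | a :: b :: c :: tl, _ => exact ⟨a, b, c, tl, rfl⟩
    rw [step_cons3]; simp

lemma inv_drop (fw : List (List Int)) (h : pvInv fw) (k : Nat) :
    ∀ l ∈ fw.drop k, l = [] ∨ 3 ≤ l.length :=
  fun l hl => h l (List.mem_of_mem_drop hl)

lemma runA_eq (n : Nat) : ∀ (fw : List (List Int)) (pos : Nat) (acc : List Int),
    pvInv fw → fw.length - pos = n →
    pvRunA fw pos acc = acc ++ pvGoSim pos 0 (fw.drop pos) := by
  induction n with
  | zero =>
    intro fw pos acc _ hn
    rw [pvRunA]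
    have hge : ¬ pos < fw.length := by omega
    have hd : List.drop pos fw = [] := List.drop_eq_nil_of_le (by omega)
    simp [hge, hd, pvGoSim]
  | succ m ih =>
    intro fw pos acc hinv hn
    have hlt : pos < fw.length := by omega
    rw [pvRunA]
    simp only [hlt, dif_pos]
    have hlen : (run_next_picosecond fw).length = fw.length := by
      simp [run_next_picosecond]
    rw [ih (run_next_picosecond fw) (pos + 1) _ (inv_step fw hinv) (by omega)]
    have hdropmap : (run_next_picosecond fw).drop (pos + 1)
        = (fw.drop (pos + 1)).map pvStepLayer := by
      simp [run_next_picosecond, List.map_drop]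
    rw [hdropmap, goSim_step _ _ _ (inv_drop fw hinv (pos + 1))]
    have hdrop : fw.drop pos = fw[pos] :: fw.drop (pos + 1) :=
      List.drop_eq_getElem_cons hlt
    rw [hdrop]
    simp only [pvGoSim, sim_zero, Nat.add_zero]
    by_cases h1 : fw[pos].length = 0
    · simp [h1]
    · have h1' : 0 < fw[pos].length := by omega
      simp only [h1, if_false, h1', if_true]
      split_ifs <;> simp

theorem run_through_firewall_spec_aux :
    ∀ (firewall : List (List Int)), Pre_run_through_firewall firewall →
      run_through_firewall firewall = run_through_firewall_alt firewall := by
  intro fw hpre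
  by_cases hinv : pvInv fw
  · rw [run_through_firewall, run_through_firewall_alt,
        runA_eq (fw.length - 0) fw 0 [] hinv rfl, goB_eq_goSim]
    simp
  · -- some layer violates the invariant: by Pre_ it is the [0, y] singleton firewall
    simp only [pvInv, not_forall] at hinv
    obtain ⟨l, hl, hbad⟩ := hinv
    rcases hpre l hl with h | h | ⟨hlen2, h0, hfw1⟩
    · exact absurd (Or.inl h) hbad
    · exact absurd (Or.inr h) hbad
    · obtain ⟨x, y, rfl⟩ : ∃ x y, l = [x, y] := by
        match l, hlen2 with
        | [x, y], _ => exact ⟨x, y, rfl⟩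
      have hx : x = 0 := by simpa [List.getD] using h0
      subst hx
      obtain ⟨rfl⟩ : fw = [[0, y]] := by
        match fw, hfw1, hl with
        | [z], _, hz => simp at hz; rw [hz]
      have hA : run_through_firewall [[0, y]] = [0] := by
        rw [run_through_firewall, pvRunA]
        norm_num [List.getD]
        rw [pvRunA]
        norm_num [run_next_picosecond]
      have hB : run_through_firewall_alt [[0, y]] = [0] := by
        simp [run_through_firewall_alt, pvGoB, List.getD]
      rw [hA, hB]

-- ===== VERDICT (by name: the statement is the Claim_ definition above) =====
theorem run_through_firewall_spec : Claim_equal_run_through_firewall := by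
  intro fw _ hpre
  exact run_through_firewall_spec_aux fw hpre
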